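-- pv_equiv track=rewrite | github.com/AbnerBissolli/Malicious-DNS-Detection | App/utils_feature_gen.py | have_words_rplc
-- ===== SOURCE A (Python) =====
-- def have_words_rplc(s, words):
--     s = s.replace('0', 'o')
--     s = s.replace('1', 'i')
--     s = s.replace('3', 'e')
--     s = s.replace('4', 'a')
--     s = s.replace('5', 's')
--     s = s.replace('6', 'g')
--     s = s.replace('7', 't')
--     s = s.replace('8', 'b')
--     s = s.replace('8', 'b')
--
--     bad_words = 0
--     for word in words:
--         if word in s:
--             bad_words +=1
--     return bad_words
-- ===== SOURCE B (Python) =====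
-- _TRANS = str.maketrans('01345678', 'oieasgtb')
--
--
-- def have_words_rplc(s, words):
--     t = s.translate(_TRANS)
--     lens = {len(w) for w in words}
--     subs = {t[i:i + n] for n in lens for i in range(len(t) - n + 1)}
--     return sum(w in subs for w in words)
-- ===== Notes on version B (the rewrite author's own statement) =====
-- stated objective: faster
-- what changed: B translates s once via a translation table, then builds a hash-set index of all substrings of t whose lengths occur among the words, so each word is tested by one O(1) set lookup instead of a full substring scan of s.
import Mathlib
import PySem

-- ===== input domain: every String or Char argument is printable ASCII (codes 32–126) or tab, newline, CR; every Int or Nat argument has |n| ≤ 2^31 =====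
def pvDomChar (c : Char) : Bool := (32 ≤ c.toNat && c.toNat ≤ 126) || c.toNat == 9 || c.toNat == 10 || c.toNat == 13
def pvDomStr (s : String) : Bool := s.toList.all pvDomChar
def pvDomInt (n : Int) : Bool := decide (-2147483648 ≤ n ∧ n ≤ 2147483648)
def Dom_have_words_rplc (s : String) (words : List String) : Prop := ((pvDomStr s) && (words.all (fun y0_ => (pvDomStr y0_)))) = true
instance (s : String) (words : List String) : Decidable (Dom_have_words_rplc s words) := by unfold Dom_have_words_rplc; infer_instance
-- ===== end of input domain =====

-- B builds a hash-set index of all substrings of the translated string at the word lengths,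
-- replacing A's per-word substring scans by one set lookup per word (objective: faster).


-- ===== PORT A =====
def have_words_rplc (s : String) (words : List String) : Int :=
  let s := PySem.Str.replace s "0" "o"
  let s := PySem.Str.replace s "1" "i"
  let s := PySem.Str.replace s "3" "e"
  let s := PySem.Str.replace s "4" "a"
  let s := PySem.Str.replace s "5" "s"
  let s := PySem.Str.replace s "6" "g"
  let s := PySem.Str.replace s "7" "t"
  let s := PySem.Str.replace s "8" "b"
  let s := PySem.Str.replace s "8" "b"
  words.foldl (fun bad_words word => if PySem.Str.isIn word s then bad_words + 1 else bad_words) 0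

-- ===== PORT B =====
-- str.maketrans('01345678', 'oieasgtb'): a 1-char → 1-char table, so s.translate(_TRANS)
-- is exactly a per-character map (ported by hand; exact on every string)
def pvTrans (c : Char) : Char :=
  if c = '0' then 'o' else if c = '1' then 'i' else if c = '3' then 'e'
  else if c = '4' then 'a' else if c = '5' then 's' else if c = '6' then 'g'
  else if c = '7' then 't' else if c = '8' then 'b' else c

def have_words_rplc_alt (s : String) (words : List String) : Int :=
  let t : List Char := s.toList.map pvTrans
  let lens : PySem.Set Int := PySem.Set.ofList (words.map (fun w => PySem.Str.len w))
  let subs : PySem.Set (List Char) := PySem.Set.ofList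
    (lens.flatMap (fun n =>
      (PySem.List.pyRange 0 ((t.length : Int) - n + 1) 1).map
        (fun i => PySem.List.slice t (some i) (some (i + n)))))
  words.foldl (fun acc w => acc + (if PySem.Set.contains subs w.toList then 1 else 0)) 0

-- ===== PRECONDITION & SPEC =====
def Spec_have_words_rplc (s : String) (words : List String) (out : Int) : Prop := out = have_words_rplc_alt s words
instance (s : String) (words : List String) (out : Int) : Decidable (Spec_have_words_rplc s words out) := by unfold Spec_have_words_rplc; infer_instance

-- ===== CLAIM (what is proved, stated in full; the proofs are below) =====
def Claim_equal_have_words_rplc : Prop := ∀ (s : String) (words : List String), Dom_have_words_rplc s words → Spec_have_words_rplc s words (have_words_rplc s words)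

-- ===== LEMMAS AND PROOFS =====

-- single-character replace is a per-character map (loop invariant of Chars.replace.go)
lemma replace_go_single (c d : Char) :
    ∀ (l : List Char) (fuel : Nat) (acc : List Char), l.length ≤ fuel →
    PySem.Chars.replace.go [c] [d] fuel l acc =
      acc.reverse ++ l.map (fun x => if x = c then d else x) := by
  intro l
  induction l with
  | nil =>
    intro fuel acc _
    cases fuel <;> simp [PySem.Chars.replace.go]
  | cons a t ih =>
    intro fuel acc h
    cases fuel with
    | zero => simp at h
    | succ n =>
      rw [PySem.Chars.replace.go]
      by_cases hac : a = c
      · subst hac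
        simp only [List.isPrefixOf, BEq.rfl, Bool.and_true, if_pos, List.length_cons,
          List.length_nil, Nat.zero_add, List.drop_succ_cons, List.drop_zero]
        rw [ih n _ (by simpa using h)]
        simp
      · have hpre : ([c].isPrefixOf (a :: t)) = false := by
          simp [List.isPrefixOf, Ne.symm hac]
        simp only [hpre, Bool.false_eq_true, if_false]
        rw [ih n _ (by simpa using h)]
        simp [hac]

lemma replace_single (c d : Char) (s : List Char) :
    PySem.Chars.replace s [c] [d] = s.map (fun x => if x = c then d else x) := by
  rw [PySem.Chars.replace]
  simp [replace_go_single c d s s.length [] le_rfl]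

-- A's nine chained replacements act on each character exactly as pvTrans
lemma chain_point (a : Char) :
    (fun x => if x = '8' then 'b' else x) ((fun x => if x = '8' then 'b' else x)
      ((fun x => if x = '7' then 't' else x) ((fun x => if x = '6' then 'g' else x)
      ((fun x => if x = '5' then 's' else x) ((fun x => if x = '4' then 'a' else x)
      ((fun x => if x = '3' then 'e' else x) ((fun x => if x = '1' then 'i' else x)
      ((fun x => if x = '0' then 'o' else x) a)))))))) = pvTrans a := by
  by_cases h0 : a = '0'; · subst h0; decide
  by_cases h1 : a = '1'; · subst h1; decide
  by_cases h3 : a = '3'; · subst h3; decide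
  by_cases h4 : a = '4'; · subst h4; decide
  by_cases h5 : a = '5'; · subst h5; decide
  by_cases h6 : a = '6'; · subst h6; decide
  by_cases h7 : a = '7'; · subst h7; decide
  by_cases h8 : a = '8'; · subst h8; decide
  simp [pvTrans, h0, h1, h3, h4, h5, h6, h7, h8]

-- A's replaced string, at the character-list level, is B's translated string
lemma chain_eq_map (l : List Char) :
    PySem.Chars.replace (PySem.Chars.replace (PySem.Chars.replace (PySem.Chars.replace
      (PySem.Chars.replace (PySem.Chars.replace (PySem.Chars.replace (PySem.Chars.replace
      (PySem.Chars.replace l ['0'] ['o']) ['1'] ['i']) ['3'] ['e']) ['4'] ['a'])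
      ['5'] ['s']) ['6'] ['g']) ['7'] ['t']) ['8'] ['b']) ['8'] ['b']
      = l.map pvTrans := by
  simp only [replace_single, List.map_map]
  refine List.map_congr_left (fun a _ => ?_)
  simp only [Function.comp_apply, Function.comp_def]
  exact chain_point a

-- infix ↔ some drop/take window of the same length equals the pattern
lemma infix_iff_window (w t : List Char) :
    w <:+: t ↔ ∃ i, i + w.length ≤ t.length ∧ (t.drop i).take w.length = w := by
  constructor
  · rintro ⟨pre, suf, rfl⟩
    refine ⟨pre.length, by simp only [List.length_append]; omega, ?_⟩
    rw [List.append_assoc, List.drop_left]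
    exact List.take_left ..
  · rintro ⟨i, hlen, hw⟩
    have h2 : List.take w.length (List.drop i t) ++ List.drop (i + w.length) t = List.drop i t := by
      rw [← List.drop_drop]
      exact List.take_append_drop _ _
    rw [hw] at h2
    exact ⟨t.take i, t.drop (i + w.length), by rw [List.append_assoc, h2, List.take_append_drop]⟩

-- a word of words is in B's substring index iff it is an infix of t
lemma mem_subs_iff (t : List Char) (words : List String) (w : String) (hw : w ∈ words) :
    (PySem.Set.contains (PySem.Set.ofList
      ((PySem.Set.ofList (words.map (fun w => PySem.Str.len w))).flatMap (fun n =>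
        (PySem.List.pyRange 0 ((t.length : Int) - n + 1) 1).map
          (fun i => PySem.List.slice t (some i) (some (i + n)))))) w.toList) = true
    ↔ w.toList <:+: t := by
  rw [PySem.Set.contains_iff, PySem.Set.mem_ofList, List.mem_flatMap]
  constructor
  · rintro ⟨n, hn, hsub⟩
    rw [List.mem_map] at hsub
    obtain ⟨i, hi, hslice⟩ := hsub
    rw [PySem.List.mem_pyRange_one] at hi
    obtain ⟨hi0, _⟩ := hi
    have hnmem : n ∈ words.map (fun w => PySem.Str.len w) := by
      rw [← PySem.Set.mem_ofList]; exact hn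
    have hn0 : 0 ≤ n := by
      rw [List.mem_map] at hnmem
      obtain ⟨v, _, rfl⟩ := hnmem
      simp [PySem.Str.len]
    rw [PySem.List.slice_toNat t hi0 (by omega)] at hslice
    rw [← hslice]
    exact (List.take_prefix _ _).isInfix.trans (List.drop_suffix _ _).isInfix
  · intro hinf
    rw [infix_iff_window] at hinf
    obtain ⟨i, hlen, hwin⟩ := hinf
    refine ⟨(w.toList.length : Int), ?_, ?_⟩
    · rw [PySem.Set.mem_ofList, List.mem_map]
      exact ⟨w, hw, by simp [PySem.Str.len]⟩
    · rw [List.mem_map]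
      refine ⟨(i : Int), ?_, ?_⟩
      · rw [PySem.List.mem_pyRange_one]
        refine ⟨by positivity, by omega⟩
      · rw [PySem.List.slice_natCast_add]
        exact hwin

-- ===== VERDICT (by name: the statement is the Claim_ definition above) =====
theorem have_words_rplc_spec : Claim_equal_have_words_rplc := by
  intro s words _
  unfold Spec_have_words_rplc have_words_rplc have_words_rplc_alt
  dsimp only
  have hfun : ∀ (q : String → Bool),
      (fun (acc : Int) (w : String) => acc + (if q w then 1 else 0)) =
      (fun (acc : Int) (w : String) => if q w then acc + 1 else acc) := by
    intro q; funext acc w; split <;> simp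
  rw [hfun, PySem.List.foldl_if_add_one, PySem.List.foldl_if_add_one]
  have hts : (PySem.Str.replace (PySem.Str.replace (PySem.Str.replace (PySem.Str.replace
      (PySem.Str.replace (PySem.Str.replace (PySem.Str.replace (PySem.Str.replace
      (PySem.Str.replace s "0" "o") "1" "i") "3" "e") "4" "a") "5" "s") "6" "g")
      "7" "t") "8" "b") "8" "b").toList = s.toList.map pvTrans := by
    simp only [PySem.Str.toList_replace]
    exact chain_eq_map s.toList
  refine congrArg _ (congrArg _ (List.countP_congr fun w hw => ?_))
  rw [PySem.Str.isIn_iff_infix, hts]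
  exact (mem_subs_iff _ words w hw).symm
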